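-- pv_equiv track=rewrite | github.com/HuynhToan2004/Unified-pipeline | phase2/processor.py | _heuristic_micro_flaw
-- ===== SOURCE A (Python) =====
-- def _heuristic_micro_flaw(text: str) -> str:
--     low = text.lower()
--     if any(k in low for k in ["baseline", "ablation"]):
--         return "Missing/ weak Baselines"
--     if any(k in low for k in ["novelty", "incremental"]):
--         return "Limited Novelty"
--     if any(k in low for k in ["citation", "prior work", "related work"]):
--         return "Missing Relevant Citations"
--     if any(k in low for k in ["proof", "theoretical", "assumption"]):
--         return "Weak Theoretical Justification/Proofs"
--     if any(k in low for k in ["typo", "grammar", "unclear", "writing"]):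
--         return "General writing & Clarity issues"
--     if any(k in low for k in ["reproduce", "implementation", "code", "repository"]):
--         return "Insufficient Implementation Details"
--     if any(k in low for k in ["limitation", "failure case", "robustness"]):
--         return "Lack of Discussion on Limitations"
--     return "Insufficient Experimental Validation"
-- ===== SOURCE B (Python) =====
-- # B: instead of a priority cascade of early-return branches, scan ALL keywords
-- # (in alphabetical order, independent of priority) and keep the MINIMUM matched
-- # priority index; the index selects the label.  Correct because the cascade's
-- # answer is exactly the label of the smallest-priority matching keyword group.
--
-- KEYWORD_PRIORITY = {  # alphabetical; the value encodes the cascade's priority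
--     "ablation": 0, "assumption": 3, "baseline": 0, "citation": 2, "code": 5,
--     "failure case": 6, "grammar": 4, "implementation": 5, "incremental": 1,
--     "limitation": 6, "novelty": 1, "prior work": 2, "proof": 3,
--     "related work": 2, "reproduce": 5, "repository": 5, "robustness": 6,
--     "theoretical": 3, "typo": 4, "unclear": 4, "writing": 4,
-- }
--
-- LABELS = [
--     "Missing/ weak Baselines",
--     "Limited Novelty",
--     "Missing Relevant Citations",
--     "Weak Theoretical Justification/Proofs",
--     "General writing & Clarity issues",
--     "Insufficient Implementation Details",
--     "Lack of Discussion on Limitations",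
--     "Insufficient Experimental Validation",
-- ]
--
-- def _heuristic_micro_flaw(text: str) -> str:
--     low = text.lower()
--     best = len(LABELS) - 1
--     for kw, pri in KEYWORD_PRIORITY.items():
--         if pri < best and kw in low:
--             best = pri
--     return LABELS[best]
-- ===== Notes on version B (the rewrite author's own statement) =====
-- stated objective: alternative
-- what changed: Instead of A's first-match priority cascade of seven early-return branches, B scans a flat alphabetically-ordered keyword->priority map once, keeping the minimum matched priority index in an accumulator, and indexes a label list with it; correctness rests on the answer being the label of the smallest matching priority group, independent of scan order.
import Mathlib
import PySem

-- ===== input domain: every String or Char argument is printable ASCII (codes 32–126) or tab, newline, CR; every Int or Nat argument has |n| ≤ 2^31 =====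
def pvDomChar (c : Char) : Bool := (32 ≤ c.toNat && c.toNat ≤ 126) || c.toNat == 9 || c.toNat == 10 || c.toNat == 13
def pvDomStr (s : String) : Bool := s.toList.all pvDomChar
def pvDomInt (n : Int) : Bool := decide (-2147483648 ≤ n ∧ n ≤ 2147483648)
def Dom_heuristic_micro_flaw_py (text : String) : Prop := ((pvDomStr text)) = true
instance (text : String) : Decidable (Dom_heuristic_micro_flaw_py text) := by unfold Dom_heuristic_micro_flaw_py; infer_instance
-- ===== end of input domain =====

-- B replaces A's priority cascade by a min-accumulator scan over an alphabetically ordered flat keyword->priority table (alternative algorithm: order-independent minimum matched priority instead of first-match cascade).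


-- ===== PORT A =====
def heuristic_micro_flaw_py (text : String) : String :=
  let low := PySem.Str.lower text
  if ["baseline", "ablation"].any (fun k => PySem.Str.isIn k low) then
    "Missing/ weak Baselines"
  else if ["novelty", "incremental"].any (fun k => PySem.Str.isIn k low) then
    "Limited Novelty"
  else if ["citation", "prior work", "related work"].any (fun k => PySem.Str.isIn k low) then
    "Missing Relevant Citations"
  else if ["proof", "theoretical", "assumption"].any (fun k => PySem.Str.isIn k low) then
    "Weak Theoretical Justification/Proofs"
  else if ["typo", "grammar", "unclear", "writing"].any (fun k => PySem.Str.isIn k low) then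
    "General writing & Clarity issues"
  else if ["reproduce", "implementation", "code", "repository"].any (fun k => PySem.Str.isIn k low) then
    "Insufficient Implementation Details"
  else if ["limitation", "failure case", "robustness"].any (fun k => PySem.Str.isIn k low) then
    "Lack of Discussion on Limitations"
  else
    "Insufficient Experimental Validation"

-- ===== PORT B =====
-- the KEYWORD_PRIORITY dict, in its (alphabetical) insertion order
def pvPairs : List (String × Nat) :=
  [ ("ablation", 0), ("assumption", 3), ("baseline", 0), ("citation", 2), ("code", 5),
    ("failure case", 6), ("grammar", 4), ("implementation", 5), ("incremental", 1),
    ("limitation", 6), ("novelty", 1), ("prior work", 2), ("proof", 3),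
    ("related work", 2), ("reproduce", 5), ("repository", 5), ("robustness", 6),
    ("theoretical", 3), ("typo", 4), ("unclear", 4), ("writing", 4) ]

def pvLabels : List String :=
  [ "Missing/ weak Baselines",
    "Limited Novelty",
    "Missing Relevant Citations",
    "Weak Theoretical Justification/Proofs",
    "General writing & Clarity issues",
    "Insufficient Implementation Details",
    "Lack of Discussion on Limitations",
    "Insufficient Experimental Validation" ]

-- loop body: 'if pri < best and kw in low: best = pri'
def pvStep (low : String) (best : Nat) (p : String × Nat) : Nat :=
  if decide (p.2 < best) && PySem.Str.isIn p.1 low then p.2 else best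

def heuristic_micro_flaw_py_alt (text : String) : String :=
  let low := PySem.Str.lower text
  let best := pvPairs.foldl (pvStep low) (pvLabels.length - 1)
  -- LABELS[best]: best is always < len(LABELS), so getD is exact here
  pvLabels.getD best ""

-- ===== PRECONDITION & SPEC =====
def Spec_heuristic_micro_flaw_py (text : String) (out : String) : Prop := out = heuristic_micro_flaw_py_alt text
instance (text : String) (out : String) : Decidable (Spec_heuristic_micro_flaw_py text out) := by unfold Spec_heuristic_micro_flaw_py; infer_instance

-- ===== CLAIM (what is proved, stated in full; the proofs are below) =====
def Claim_equal_heuristic_micro_flaw_py : Prop := ∀ (text : String), Dom_heuristic_micro_flaw_py text → Spec_heuristic_micro_flaw_py text (heuristic_micro_flaw_py text)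

-- ===== LEMMAS AND PROOFS =====

-- pvPairs reordered so that each priority group is contiguous, in A's in-group order
def pvGrouped : List (String × Nat) :=
  [ ("baseline", 0), ("ablation", 0),
    ("novelty", 1), ("incremental", 1),
    ("citation", 2), ("prior work", 2), ("related work", 2),
    ("proof", 3), ("theoretical", 3), ("assumption", 3),
    ("typo", 4), ("grammar", 4), ("unclear", 4), ("writing", 4),
    ("reproduce", 5), ("implementation", 5), ("code", 5), ("repository", 5),
    ("limitation", 6), ("failure case", 6), ("robustness", 6) ]

lemma pvStep_eq (low : String) (b : Nat) (p : String × Nat) :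
    pvStep low b p = if PySem.Str.isIn p.1 low = true then Nat.min b p.2 else b := by
  unfold pvStep
  cases h : PySem.Str.isIn p.1 low
  · simp
  · simp only [Bool.and_true, decide_eq_true_eq]
    split_ifs <;> simp only [Nat.min_def] <;> split_ifs <;> omega

lemma pvStep_comm (low : String) (b : Nat) (p q : String × Nat) :
    pvStep low (pvStep low b p) q = pvStep low (pvStep low b q) p := by
  rw [pvStep_eq, pvStep_eq, pvStep_eq, pvStep_eq]
  split_ifs <;> simp only [Nat.min_def] <;> split_ifs <;> omega

lemma pvFoldl_perm (low : String) {l1 l2 : List (String × Nat)} (h : l1.Perm l2) :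
    ∀ b, l1.foldl (pvStep low) b = l2.foldl (pvStep low) b := by
  induction h with
  | nil => intro b; rfl
  | cons x _ ih => intro b; simpa using ih (pvStep low b x)
  | swap x y l => intro b; simp [List.foldl, pvStep_comm low b y x]
  | trans _ _ ih1 ih2 => intro b; exact (ih1 b).trans (ih2 b)

lemma pvPerm : pvPairs.Perm pvGrouped := by decide

-- one contiguous priority block collapses to a min with its 'any' test
lemma pvBlock (low : String) (k : Nat) (hk : k ≤ 7) :
    ∀ (l : List (String × Nat)), (∀ p ∈ l, p.2 = k) → ∀ X, X ≤ 7 →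
      l.foldl (pvStep low) X =
        Nat.min X (if l.any (fun p => PySem.Str.isIn p.1 low) then k else 7) := by
  intro l
  induction l with
  | nil => intro _ X hX; simp [Nat.min_eq_left hX]
  | cons p l ih =>
    intro hall X hX
    have hp : p.2 = k := hall p (List.mem_cons_self ..)
    have hall' : ∀ q ∈ l, q.2 = k := fun q hq => hall q (List.mem_cons_of_mem _ hq)
    cases h : PySem.Str.isIn p.1 low
    · have hstep : pvStep low X p = X := by rw [pvStep_eq, h]; simp
      rw [List.foldl_cons, hstep, ih hall' X hX]
      simp only [List.any_cons, h, Bool.false_or]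
    · have hstep : pvStep low X p = Nat.min X k := by rw [pvStep_eq, h, hp]; simp
      rw [List.foldl_cons, hstep, ih hall' _ (Nat.le_trans (Nat.min_le_left _ _) hX)]
      simp only [List.any_cons, h, Bool.true_or]
      split_ifs <;> simp only [Nat.min_def] <;> split_ifs <;> omega

-- the final comparison over the seven category booleans
lemma pvFinal (c0 c1 c2 c3 c4 c5 c6 : Bool) :
    pvLabels.getD
      (Nat.min (Nat.min (Nat.min (Nat.min (Nat.min (Nat.min (Nat.min 7
        (if c0 then 0 else 7)) (if c1 then 1 else 7)) (if c2 then 2 else 7))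
        (if c3 then 3 else 7)) (if c4 then 4 else 7)) (if c5 then 5 else 7))
        (if c6 then 6 else 7)) "" =
    (if c0 then "Missing/ weak Baselines"
     else if c1 then "Limited Novelty"
     else if c2 then "Missing Relevant Citations"
     else if c3 then "Weak Theoretical Justification/Proofs"
     else if c4 then "General writing & Clarity issues"
     else if c5 then "Insufficient Implementation Details"
     else if c6 then "Lack of Discussion on Limitations"
     else "Insufficient Experimental Validation") := by
  cases c0 <;> cases c1 <;> cases c2 <;> cases c3 <;> cases c4 <;> cases c5 <;> cases c6 <;> rfl

-- grouped fold collapses to nested mins over the seven category tests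
lemma pvGroupedFold (low : String) :
    List.foldl (pvStep low) 7 pvGrouped =
      Nat.min (Nat.min (Nat.min (Nat.min (Nat.min (Nat.min (Nat.min 7
        (if PySem.Str.isIn "baseline" low || (PySem.Str.isIn "ablation" low) then 0 else 7))
        (if PySem.Str.isIn "novelty" low || (PySem.Str.isIn "incremental" low) then 1 else 7))
        (if PySem.Str.isIn "citation" low || (PySem.Str.isIn "prior work" low || PySem.Str.isIn "related work" low) then 2 else 7))
        (if PySem.Str.isIn "proof" low || (PySem.Str.isIn "theoretical" low || PySem.Str.isIn "assumption" low) then 3 else 7))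
        (if PySem.Str.isIn "typo" low || (PySem.Str.isIn "grammar" low || (PySem.Str.isIn "unclear" low || PySem.Str.isIn "writing" low)) then 4 else 7))
        (if PySem.Str.isIn "reproduce" low || (PySem.Str.isIn "implementation" low || (PySem.Str.isIn "code" low || PySem.Str.isIn "repository" low)) then 5 else 7))
        (if PySem.Str.isIn "limitation" low || (PySem.Str.isIn "failure case" low || PySem.Str.isIn "robustness" low) then 6 else 7) := by
  have e : pvGrouped =
      [("baseline",0),("ablation",0)] ++ ([("novelty",1),("incremental",1)] ++
      ([("citation",2),("prior work",2),("related work",2)] ++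
      ([("proof",3),("theoretical",3),("assumption",3)] ++
      ([("typo",4),("grammar",4),("unclear",4),("writing",4)] ++
      ([("reproduce",5),("implementation",5),("code",5),("repository",5)] ++
      [("limitation",6),("failure case",6),("robustness",6)]))))) := rfl
  rw [e, List.foldl_append, List.foldl_append, List.foldl_append, List.foldl_append,
      List.foldl_append, List.foldl_append]
  rw [pvBlock low 0 (by omega) _ (by simp) 7 (by omega)]
  rw [pvBlock low 1 (by omega) _ (by simp) _ (Nat.le_trans (Nat.min_le_left _ _) (by omega))]
  rw [pvBlock low 2 (by omega) _ (by simp) _ (Nat.le_trans (Nat.min_le_left _ _) (Nat.le_trans (Nat.min_le_left _ _) (by omega)))]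
  rw [pvBlock low 3 (by omega) _ (by simp) _ (Nat.le_trans (Nat.min_le_left _ _) (Nat.le_trans (Nat.min_le_left _ _) (Nat.le_trans (Nat.min_le_left _ _) (by omega))))]
  rw [pvBlock low 4 (by omega) _ (by simp) _ (Nat.le_trans (Nat.min_le_left _ _) (Nat.le_trans (Nat.min_le_left _ _) (Nat.le_trans (Nat.min_le_left _ _) (Nat.le_trans (Nat.min_le_left _ _) (by omega)))))]
  rw [pvBlock low 5 (by omega) _ (by simp) _ (Nat.le_trans (Nat.min_le_left _ _) (Nat.le_trans (Nat.min_le_left _ _) (Nat.le_trans (Nat.min_le_left _ _) (Nat.le_trans (Nat.min_le_left _ _) (Nat.le_trans (Nat.min_le_left _ _) (by omega))))))]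
  rw [pvBlock low 6 (by omega) _ (by simp) _ (Nat.le_trans (Nat.min_le_left _ _) (Nat.le_trans (Nat.min_le_left _ _) (Nat.le_trans (Nat.min_le_left _ _) (Nat.le_trans (Nat.min_le_left _ _) (Nat.le_trans (Nat.min_le_left _ _) (Nat.le_trans (Nat.min_le_left _ _) (by omega)))))))]
  simp only [List.any_cons, List.any_nil, Bool.or_false]

-- ===== VERDICT (by name: the statement is the Claim_ definition above) =====
theorem heuristic_micro_flaw_py_spec : Claim_equal_heuristic_micro_flaw_py := by
  intro text _
  show heuristic_micro_flaw_py text = heuristic_micro_flaw_py_alt text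
  simp only [heuristic_micro_flaw_py, heuristic_micro_flaw_py_alt]
  have hlen : pvLabels.length - 1 = 7 := rfl
  rw [hlen, pvFoldl_perm _ pvPerm, pvGroupedFold, ← pvFinal]
  simp only [List.any_cons, List.any_nil, Bool.or_false]
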